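-- pv_equiv track=rewrite | github.com/cedrichenrotel/python_03 | ex4/ft_inventory_system.py | inventory_statistics
-- ===== SOURCE A (Python) =====
-- def inventory_statistics(list_inv: dict) -> tuple:
--     value = next(iter(list_inv.items()))
--     most_key, most_val = value
--     least_key, least_val = value
--
--     for key, val in list_inv.items():
--
--         if (val > most_val):
--             most_val = val
--             most_key = key
--         elif (val < least_val):
--             least_val = val
--             least_key = key
--
--     return (most_key, most_val), (least_key, least_val)
-- ===== SOURCE B (Python) =====
-- def inventory_statistics(list_inv: dict) -> tuple:
--     items = list(list_inv.items())
--     most = max(items, key=lambda kv: kv[1])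
--     least = min(items, key=lambda kv: kv[1])
--     return most, least
-- ===== Notes on version B (the rewrite author's own statement) =====
-- stated objective: idiomatic
-- what changed: Replaces the hand-written single running-comparison loop with two standard-library scans: max(items, key=...) and min(items, key=...), whose first-occurrence tie-breaking matches A's strict comparisons.
-- outside the precondition, e.g. on inventory_statistics({}): A raises StopIteration, B raises ValueError
import Mathlib
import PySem

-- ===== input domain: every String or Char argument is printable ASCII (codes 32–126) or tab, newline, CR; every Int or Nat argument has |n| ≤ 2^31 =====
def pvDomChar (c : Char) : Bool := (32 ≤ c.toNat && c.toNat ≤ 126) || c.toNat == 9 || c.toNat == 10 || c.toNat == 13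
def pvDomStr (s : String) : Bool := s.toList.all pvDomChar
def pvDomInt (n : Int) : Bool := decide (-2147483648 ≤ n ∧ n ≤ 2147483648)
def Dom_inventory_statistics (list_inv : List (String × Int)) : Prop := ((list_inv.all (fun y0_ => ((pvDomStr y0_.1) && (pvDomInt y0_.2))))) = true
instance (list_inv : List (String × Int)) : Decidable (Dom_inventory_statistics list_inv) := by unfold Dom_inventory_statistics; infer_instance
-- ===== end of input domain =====

-- B replaces A's hand-written single running-comparison loop with two library scans
-- (max / min with a key), the idiomatic way to take dict-value extrema; first-occurrence
-- tie-breaking matches A's strict comparisons.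


-- ===== PORT A =====
-- loop body: if val > most_val … elif val < least_val … (state = ((most_key,most_val),(least_key,least_val)))
def invStepA (st : (String × Int) × (String × Int)) (kv : String × Int) :
    (String × Int) × (String × Int) :=
  if kv.2 > st.1.2 then ((kv.1, kv.2), st.2)
  else if kv.2 < st.2.2 then (st.1, (kv.1, kv.2))
  else st

def inventory_statistics (list_inv : List (String × Int)) : (String × Int) × (String × Int) :=
  match list_inv with
  | [] => (("", 0), ("", 0))   -- Python raises StopIteration here; excluded by Pre_
  | value :: _ => list_inv.foldl invStepA (value, value)

-- ===== PORT B =====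
def inventory_statistics_alt (list_inv : List (String × Int)) : (String × Int) × (String × Int) :=
  match PySem.List.max? list_inv (fun kv => kv.2), PySem.List.min? list_inv (fun kv => kv.2) with
  | some most, some least => (most, least)
  | _, _ => (("", 0), ("", 0))   -- Python raises ValueError here; excluded by Pre_

-- ===== PRECONDITION & SPEC =====
-- A raises StopIteration on the empty dict (and B raises ValueError there): excluded.
def Pre_inventory_statistics (list_inv : List (String × Int)) : Prop := list_inv ≠ []
instance (list_inv : List (String × Int)) : Decidable (Pre_inventory_statistics list_inv) := by unfold Pre_inventory_statistics; infer_instance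
def pvWitness_inventory_statistics : (List (String × Int)) := ([("apple", 3), ("pear", 1)])

def Spec_inventory_statistics (list_inv : List (String × Int)) (out : (String × Int) × (String × Int)) : Prop := out = inventory_statistics_alt list_inv
instance (list_inv : List (String × Int)) (out : (String × Int) × (String × Int)) : Decidable (Spec_inventory_statistics list_inv out) := by unfold Spec_inventory_statistics; infer_instance

-- ===== CLAIM (what is proved, stated in full; the proofs are below) =====
def Claim_equal_inventory_statistics : Prop := ∀ (list_inv : List (String × Int)), Dom_inventory_statistics list_inv → Pre_inventory_statistics list_inv → Spec_inventory_statistics list_inv (inventory_statistics list_inv)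

-- ===== LEMMAS AND PROOFS =====

-- the running maximum / minimum that the two library scans compute
def maxS (m x : String × Int) : String × Int := if m.2 < x.2 then x else m
def minS (m x : String × Int) : String × Int := if x.2 < m.2 then x else m

lemma max?_cons (t : List (String × Int)) (v : String × Int) :
    PySem.List.max? (v :: t) (fun kv => kv.2) = some (t.foldl maxS v) := by
  induction t generalizing v with
  | nil => simp [PySem.List.max?]
  | cons x t ih =>
      have h := ih (maxS v x)
      simp only [PySem.List.max?, List.foldl_cons] at h ⊢
      simpa [maxS, apply_ite] using h

lemma min?_cons (t : List (String × Int)) (v : String × Int) :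
    PySem.List.min? (v :: t) (fun kv => kv.2) = some (t.foldl minS v) := by
  induction t generalizing v with
  | nil => simp [PySem.List.min?]
  | cons x t ih =>
      have h := ih (minS v x)
      simp only [PySem.List.min?, List.foldl_cons] at h ⊢
      simpa [minS, apply_ite] using h

-- A's single fused loop splits into the two scans as long as least ≤ most
lemma foldA_split (t : List (String × Int)) (mo le : String × Int) (h : le.2 ≤ mo.2) :
    t.foldl invStepA (mo, le) = (t.foldl maxS mo, t.foldl minS le) := by
  induction t generalizing mo le with
  | nil => rfl
  | cons x t ih =>
      simp only [List.foldl_cons]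
      by_cases h1 : x.2 > mo.2
      · rw [show invStepA (mo, le) x = (x, le) from by simp [invStepA, h1],
            show maxS mo x = x from by simp [maxS, h1],
            show minS le x = le from by simp [minS, show ¬ x.2 < le.2 by omega]]
        exact ih x le (by omega)
      · by_cases h2 : x.2 < le.2
        · rw [show invStepA (mo, le) x = (mo, x) from by simp [invStepA, h1, h2],
              show maxS mo x = mo from by simp [maxS, show ¬ mo.2 < x.2 by omega],
              show minS le x = x from by simp [minS, h2]]
          exact ih mo x (by omega)
        · rw [show invStepA (mo, le) x = (mo, le) from by simp [invStepA, h1, h2],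
              show maxS mo x = mo from by simp [maxS, show ¬ mo.2 < x.2 by omega],
              show minS le x = le from by simp [minS, h2]]
          exact ih mo le h

-- ===== VERDICT (by name: the statement is the Claim_ definition above) =====
theorem inventory_statistics_spec : Claim_equal_inventory_statistics := by
  intro l _ hpre
  unfold Spec_inventory_statistics
  match l with
  | [] => exact absurd rfl hpre
  | v :: t =>
      unfold inventory_statistics inventory_statistics_alt
      rw [max?_cons, min?_cons]
      simp only [List.foldl_cons]
      rw [show invStepA (v, v) v = (v, v) from by simp [invStepA],
          foldA_split t v v le_rfl]
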